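-- pv_equiv track=rewrite | github.com/A-Daes/suicide | Comp/getStates.py | getStart
-- ===== SOURCE A (Python) =====
-- def getStart(Automata):
--         x = 0
--         currentstate = 0
--         slist = []
--         end =False
--         print (Automata[x:])
--         while end == False:
--                 if (Automata[x+1] != "*"):
--                         slist.append(currentstate)
--                         currentstate = currentstate + 1
--                         end = True
--                 else:
--                         x= x+2
--                         slist.append(currentstate)
--                         currentstate = currentstate + 1
--         return(slist)
-- ===== SOURCE B (Python) =====
-- def getStart(Automata):
--     print(Automata[0:])
--     odds = Automata[1::2]
--     run = len(odds) - len(odds.lstrip("*"))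
--     return list(range(run + 1))
-- ===== Notes on version B (the rewrite author's own statement) =====
-- stated objective: simpler
-- what changed: B replaces A's stateful index-stepping while loop (x, currentstate, end flag, in-loop appends) with three staged string/list operations: slice the odd-index characters with Automata[1::2], measure the leading '*' run via lstrip, and build the result in one shot with list(range(run+1)).
-- crash fix: A raises IndexError whenever every odd-index character of Automata is '*' (its scan of odd indices runs past the end of the string, including when the string is empty or has no non-star odd character); B returns list(range(run+1)) there, counting the whole run of '*' pairs. — e.g. on getStart("a*"): A raises IndexError, B returns [0, 1]
import Mathlib
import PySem

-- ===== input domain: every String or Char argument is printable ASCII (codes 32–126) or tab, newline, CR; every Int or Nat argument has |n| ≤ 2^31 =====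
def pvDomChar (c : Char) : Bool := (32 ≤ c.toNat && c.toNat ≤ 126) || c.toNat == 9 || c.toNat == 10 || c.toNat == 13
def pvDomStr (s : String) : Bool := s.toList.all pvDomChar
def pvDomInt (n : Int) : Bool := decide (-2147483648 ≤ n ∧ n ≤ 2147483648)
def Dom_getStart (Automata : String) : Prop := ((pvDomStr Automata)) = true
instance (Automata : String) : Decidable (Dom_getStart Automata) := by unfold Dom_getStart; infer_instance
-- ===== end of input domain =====

-- B slices the odd-index characters (Automata[1::2]), measures the leading '*' run with lstrip,
-- and builds the result as list(range(run+1)) — no index-stepping loop, no state variables.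
-- Both programs print(Automata[0:]) identically; the equivalence proved is about the return value.

-- ===== PORT A =====
-- A's while loop: x steps through odd indices; index out of range = IndexError (excluded by Pre_),
-- modelled by returning the accumulator so far (never reached under Pre_).
def getStartLoop (cs : List Char) (x : Nat) (cur : Int) (slist : List Int) : List Int :=
  match h : cs[x+1]? with
  | none => slist                                   -- Python raises IndexError here
  | some c =>
      if c ≠ '*' then slist ++ [cur]
      else getStartLoop cs (x+2) (cur+1) (slist ++ [cur])
termination_by cs.length - x
decreasing_by
  have : x + 1 < cs.length := (List.getElem?_eq_some_iff.mp h).1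
  omega

def getStart (Automata : String) : List Int :=
  -- print(Automata[x:]) is a side effect only; return value unaffected
  getStartLoop Automata.toList 0 0 []

-- ===== PORT B =====
-- hand port of the slice Automata[1::2]: every second character starting at index 1 (exact)
def oddChars : List Char → List Char
  | [] => []
  | [_] => []
  | _ :: b :: t => b :: oddChars t

def getStart_alt (Automata : String) : List Int :=
  let odds := oddChars Automata.toList
  -- len(odds) - len(odds.lstrip("*")): lstrip("*") drops the leading '*' characters (exact)
  let run : Nat := odds.length - (odds.dropWhile (· == '*')).length
  PySem.List.pyRange 0 ((run : Int) + 1) 1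

-- ===== PRECONDITION & SPEC =====
-- Pre_ excludes exactly the inputs on which A raises IndexError (every odd-index character is
-- '*', so the scan of indices 1,3,5,… runs past the end); B returns a value there (see Raises_).
def Pre_getStart (Automata : String) : Prop :=
  ∃ i < Automata.toList.length, 2*i+1 < Automata.toList.length ∧ Automata.toList[2*i+1]? ≠ some '*'
instance (Automata : String) : Decidable (Pre_getStart Automata) := by unfold Pre_getStart; infer_instance

def pvWitness_getStart : String := "ab"

-- A raises IndexError whenever every odd-index character of Automata is '*' (including the empty
-- string); B returns list(range(run+1)) there, counting the whole run of '*' pairs.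
def Raises_getStart (Automata : String) : Prop :=
  ∀ i < Automata.toList.length, 2*i+1 < Automata.toList.length → Automata.toList[2*i+1]? = some '*'
instance (Automata : String) : Decidable (Raises_getStart Automata) := by unfold Raises_getStart; infer_instance

def pvRaiseWitness_getStart : String := "a*"
def pvRaiseWitnessOut_getStart : List Int := [0, 1]

def Spec_getStart (Automata : String) (out : List Int) : Prop := out = getStart_alt Automata
instance (Automata : String) (out : List Int) : Decidable (Spec_getStart Automata out) := by unfold Spec_getStart; infer_instance

-- ===== CLAIM (what is proved, stated in full; the proofs are below) =====
def Claim_equal_getStart : Prop := ∀ (Automata : String), Dom_getStart Automata → Pre_getStart Automata → Spec_getStart Automata (getStart Automata)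
def Claim_raises_getStart : Prop := (∀ (Automata : String), Dom_getStart Automata → Raises_getStart Automata → ¬ Pre_getStart Automata) ∧ (Dom_getStart (pvRaiseWitness_getStart) ∧ Raises_getStart (pvRaiseWitness_getStart) ∧ getStart_alt (pvRaiseWitness_getStart) = pvRaiseWitnessOut_getStart)

-- ===== LEMMAS AND PROOFS =====

lemma oddChars_getElem? (cs : List Char) : ∀ k, (oddChars cs)[k]? = cs[2*k+1]? := by
  induction cs using oddChars.induct with
  | case1 => intro k; simp [oddChars]
  | case2 a =>
      intro k
      have h1 : (2*k+1 : Nat) ≥ 1 := by omega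
      simp [oddChars]
  | case3 a b t ih =>
      intro k
      cases k with
      | zero => simp [oddChars]
      | succ k =>
          have harith : 2*(k+1)+1 = (2*k+1)+1+1 := by omega
          simp only [oddChars, List.getElem?_cons_succ, harith]
          exact ih k

lemma run_eq_takeWhile (p : Char → Bool) (l : List Char) :
    l.length - (l.dropWhile p).length = (l.takeWhile p).length := by
  have h := congrArg List.length (List.takeWhile_append_dropWhile (p := p) (l := l))
  rw [List.length_append] at h
  omega

lemma range_map_shift (cur : Int) (m : Nat) :
    cur :: (List.range m).map (fun j => cur + 1 + Int.ofNat j)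
      = (List.range (m+1)).map (fun j => cur + Int.ofNat j) := by
  rw [List.range_succ_eq_map, List.map_cons, List.map_map]
  congr 1
  · simp
  · apply List.map_congr_left
    intro j _
    simp [Function.comp, Int.ofNat_eq_natCast]
    ring

lemma getStartLoop_eq : ∀ (n : Nat) (cs : List Char) (k : Nat) (cur : Int) (acc : List Int),
    cs.length - 2*k ≤ n →
    (∃ c ∈ (oddChars cs).drop k, c ≠ '*') →
    getStartLoop cs (2*k) cur acc
      = acc ++ (List.range ((((oddChars cs).drop k).takeWhile (· == '*')).length + 1)).map
          (fun j => cur + Int.ofNat j) := by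
  intro n
  induction n with
  | zero =>
      intro cs k cur acc hn ⟨c, hc, _⟩
      have hk : k < (oddChars cs).length := by
        by_contra hk
        rw [List.drop_eq_nil_of_le (by omega)] at hc
        exact absurd hc (List.not_mem_nil)
      have := (List.getElem?_eq_some_iff.mp
        ((oddChars_getElem? cs k).symm ▸ List.getElem?_eq_getElem hk)).1
      omega
  | succ n ih =>
      intro cs k cur acc hn ⟨c, hc, hcne⟩
      have hk : k < (oddChars cs).length := by
        by_contra hk
        rw [List.drop_eq_nil_of_le (by omega)] at hc
        exact absurd hc (List.not_mem_nil)
      have hget : cs[2*k+1]? = some ((oddChars cs)[k]) := by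
        rw [← oddChars_getElem? cs k]; exact List.getElem?_eq_getElem hk
      have hdrop : (oddChars cs).drop k = (oddChars cs)[k] :: (oddChars cs).drop (k+1) :=
        (List.getElem_cons_drop hk).symm
      rw [getStartLoop, hget]
      by_cases hstar : (oddChars cs)[k] = '*'
      · simp only [hstar, ne_eq, not_true_eq_false, if_false]
        have h2 : 2*k+2 = 2*(k+1) := by omega
        have hnext : ∃ c ∈ (oddChars cs).drop (k+1), c ≠ '*' := by
          refine ⟨c, ?_, hcne⟩
          rw [hdrop, hstar] at hc
          rcases List.mem_cons.mp hc with h | h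
          · exact absurd h hcne
          · exact h
        have hlen : 2*k+1 < cs.length := (List.getElem?_eq_some_iff.mp hget).1
        rw [h2, ih cs (k+1) (cur+1) (acc ++ [cur]) (by omega) hnext]
        rw [hdrop, hstar]
        simp only [List.takeWhile_cons, beq_self_eq_true, if_true, List.length_cons]
        rw [List.append_assoc, List.singleton_append]
        congr 1
        exact range_map_shift cur _
      · simp only [ne_eq, hstar, not_false_eq_true, if_true]
        rw [hdrop]
        simp only [List.takeWhile_cons, beq_iff_eq, hstar, if_false, List.length_nil]
        simp

-- ===== VERDICT (by name: the statement is the Claim_ definition above) =====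
theorem getStart_spec : Claim_equal_getStart := by
  intro Automata _ hpre
  obtain ⟨i, hi, hlt, hne⟩ := hpre
  unfold Spec_getStart getStart getStart_alt
  have hk : i < (oddChars Automata.toList).length := by
    rcases Nat.lt_or_ge i (oddChars Automata.toList).length with h | h
    · exact h
    · exfalso
      have : (oddChars Automata.toList)[i]? = none := List.getElem?_eq_none (by omega)
      rw [oddChars_getElem?] at this
      rw [List.getElem?_eq_getElem hlt] at this
      simp at this
  have hmem : ∃ c ∈ (oddChars Automata.toList).drop 0, c ≠ '*' := by
    refine ⟨(oddChars Automata.toList)[i], ?_, ?_⟩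
    · rw [List.drop_zero]
      exact List.getElem_mem hk
    · intro h
      apply hne
      rw [← oddChars_getElem? Automata.toList i, List.getElem?_eq_getElem hk, h]
  have h := getStartLoop_eq (Automata.toList.length) Automata.toList 0 0 [] (by omega) hmem
  simp only [Nat.mul_zero, List.drop_zero] at h
  rw [h]
  show _ = PySem.List.pyRange 0 ((((oddChars Automata.toList).length -
      ((oddChars Automata.toList).dropWhile (fun x => x == '*')).length : Nat) : Int) + 1) 1
  rw [run_eq_takeWhile, PySem.List.pyRange_one]
  simp

def getStart_raises : Claim_raises_getStart := by
  unfold Claim_raises_getStart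
  constructor
  · intro Automata _ hr ⟨i, hi, hlt, hne⟩
    exact hne (hr i hi hlt)
  · exact ⟨by decide, by decide, by decide⟩
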